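-- pv_equiv track=rewrite | github.com/sugi-a/pmimt | transformer/language_model/datasetloader.py | gen_doc_from_lines
-- ===== SOURCE A (Python) =====
-- def gen_doc_from_lines(seq_iterable):
--     doc = []
--     for seq in seq_iterable:
--         if len(seq) == 0:
--             if len(doc) > 0:
--                 yield doc
--             doc = []
--         else:
--             doc.append(seq)
--     if len(doc) > 0:
--         yield doc
-- ===== SOURCE B (Python) =====
-- from itertools import groupby
--
-- def gen_doc_from_lines(seq_iterable):
--     for is_blank, group in groupby(seq_iterable, key=lambda seq: len(seq) == 0):
--         if not is_blank:
--             yield list(group)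
-- ===== Notes on version B (the rewrite author's own statement) =====
-- stated objective: idiomatic
-- what changed: Replaces the explicit accumulator/flush loop with itertools.groupby on the blank-line key, yielding each non-blank run directly.
import Mathlib
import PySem

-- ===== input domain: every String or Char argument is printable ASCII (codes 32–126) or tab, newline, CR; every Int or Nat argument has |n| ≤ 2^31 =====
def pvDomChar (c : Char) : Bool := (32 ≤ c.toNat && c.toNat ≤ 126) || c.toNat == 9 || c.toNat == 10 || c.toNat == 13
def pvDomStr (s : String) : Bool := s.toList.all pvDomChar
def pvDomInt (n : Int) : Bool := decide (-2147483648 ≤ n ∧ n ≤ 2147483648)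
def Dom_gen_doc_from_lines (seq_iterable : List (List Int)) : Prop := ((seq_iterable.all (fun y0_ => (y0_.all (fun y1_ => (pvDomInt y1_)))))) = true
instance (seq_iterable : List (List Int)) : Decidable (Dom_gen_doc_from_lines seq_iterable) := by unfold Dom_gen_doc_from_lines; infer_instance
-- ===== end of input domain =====

-- ===== PORT A =====
-- A: explicit accumulator/flush loop (fold with state (doc, out)).
def gen_doc_from_lines (seq_iterable : List (List Int)) : List (List (List Int)) :=
  let st := seq_iterable.foldl
    (fun (st : List (List Int) × List (List (List Int))) seq =>
      if seq.length = 0 then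
        (if st.1.length > 0 then ([], st.2 ++ [st.1]) else ([], st.2))
      else (st.1 ++ [seq], st.2)) ([], [])
  if st.1.length > 0 then st.2 ++ [st.1] else st.2

-- ===== PORT B =====
-- B: groupby traversal — skip each blank run, emit each non-blank run as one document.
def gen_doc_from_lines_alt : List (List Int) → List (List (List Int))
  | [] => []
  | x :: xs =>
    if x.isEmpty then gen_doc_from_lines_alt (xs.dropWhile (·.isEmpty))
    else (x :: xs.takeWhile (fun s => !s.isEmpty)) ::
         gen_doc_from_lines_alt (xs.dropWhile (fun s => !s.isEmpty))
termination_by l => l.length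
decreasing_by
  · have := List.length_dropWhile_le (·.isEmpty) xs; simp; omega
  · have := List.length_dropWhile_le (fun s : List Int => !s.isEmpty) xs; simp; omega

-- ===== PRECONDITION & SPEC =====
def Spec_gen_doc_from_lines (seq_iterable : List (List Int)) (out : List (List (List Int))) : Prop := out = gen_doc_from_lines_alt seq_iterable
instance (seq_iterable : List (List Int)) (out : List (List (List Int))) : Decidable (Spec_gen_doc_from_lines seq_iterable out) := by unfold Spec_gen_doc_from_lines; infer_instance

-- ===== CLAIM (what is proved, stated in full; the proofs are below) =====
def Claim_equal_gen_doc_from_lines : Prop := ∀ (seq_iterable : List (List Int)), Dom_gen_doc_from_lines seq_iterable → Spec_gen_doc_from_lines seq_iterable (gen_doc_from_lines seq_iterable)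

-- ===== LEMMAS AND PROOFS =====

-- ===== LEMMAS =====
-- B ignores leading blank lines
theorem alt_dropWhile_blank (xs : List (List Int)) :
    gen_doc_from_lines_alt (xs.dropWhile (·.isEmpty)) = gen_doc_from_lines_alt xs := by
  induction xs with
  | nil => rfl
  | cons y ys ih =>
    by_cases hy : y.isEmpty
    · rw [List.dropWhile_cons_of_pos (by simp [hy])]
      rw [ih, gen_doc_from_lines_alt]
      simp [hy, ih]
    · rw [List.dropWhile_cons_of_neg (by simp [hy])]

theorem tw_append (ds : List (List Int)) (xs : List (List Int))
    (h : ∀ s ∈ ds, s ≠ []) :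
    (ds ++ [] :: xs).takeWhile (fun s => !s.isEmpty) = ds := by
  induction ds with
  | nil => simp
  | cons d rest ih =>
    have hd : d ≠ [] := h d (by simp)
    simp only [List.cons_append, List.takeWhile_cons]
    simp [hd, ih (fun s hs => h s (by simp [hs]))]

theorem dw_append (ds : List (List Int)) (xs : List (List Int))
    (h : ∀ s ∈ ds, s ≠ []) :
    (ds ++ [] :: xs).dropWhile (fun s => !s.isEmpty) = [] :: xs := by
  induction ds with
  | nil => simp
  | cons d rest ih =>
    have hd : d ≠ [] := h d (by simp)
    simp only [List.cons_append, List.dropWhile_cons]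
    simp [hd, ih (fun s hs => h s (by simp [hs]))]

-- B on a blank-free nonempty block yields just that block
theorem alt_block (d : List Int) (ds : List (List Int)) (h : ∀ s ∈ d :: ds, s ≠ []) :
    gen_doc_from_lines_alt (d :: ds) = [d :: ds] := by
  have hd : d ≠ [] := h d (by simp)
  rw [gen_doc_from_lines_alt]
  have htw : ds.takeWhile (fun s => !s.isEmpty) = ds :=
    List.takeWhile_eq_self_iff.mpr (by
      intro s hs; simpa [List.isEmpty_iff] using h s (by simp [hs]))
  have hdw : ds.dropWhile (fun s => !s.isEmpty) = [] :=
    List.dropWhile_eq_nil_iff.mpr (by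
      intro s hs; simpa [List.isEmpty_iff] using h s (by simp [hs]))
  simp [List.isEmpty_iff, hd, htw, hdw, gen_doc_from_lines_alt]

theorem alt_append_blank (ds : List (List Int)) (xs : List (List Int))
    (h : ∀ s ∈ ds, s ≠ []) :
    gen_doc_from_lines_alt (ds ++ [] :: xs) =
      (if ds.length > 0 then [ds] else []) ++ gen_doc_from_lines_alt xs := by
  cases ds with
  | nil =>
    rw [List.nil_append, gen_doc_from_lines_alt]
    simp [alt_dropWhile_blank]
  | cons d rest =>
    have hd : d ≠ [] := h d (by simp)
    have hr : ∀ s ∈ rest, s ≠ [] := fun s hs => h s (by simp [hs])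
    rw [List.cons_append, gen_doc_from_lines_alt]
    rw [tw_append rest xs hr, dw_append rest xs hr]
    rw [gen_doc_from_lines_alt]
    simp [List.isEmpty_iff, hd, alt_dropWhile_blank]

-- main invariant: A's fold starting from pending doc/out equals out ++ B of (doc ++ rest)
theorem main_inv (l : List (List Int)) :
    ∀ (doc : List (List Int)) (out : List (List (List Int))),
      (∀ s ∈ doc, s ≠ []) →
      (let st := l.foldl
        (fun (st : List (List Int) × List (List (List Int))) seq =>
          if seq.length = 0 then
            (if st.1.length > 0 then ([], st.2 ++ [st.1]) else ([], st.2))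
          else (st.1 ++ [seq], st.2)) (doc, out)
       if st.1.length > 0 then st.2 ++ [st.1] else st.2)
        = out ++ gen_doc_from_lines_alt (doc ++ l) := by
  induction l with
  | nil =>
    intro doc out h
    simp only [List.foldl_nil, List.append_nil]
    cases doc with
    | nil => simp [gen_doc_from_lines_alt]
    | cons d rest => simp [alt_block d rest h]
  | cons s xs ih =>
    intro doc out h
    by_cases hs : s = []
    · subst hs
      simp only [List.foldl_cons, List.length_nil, reduceIte]
      by_cases hdoc : doc.length > 0
      · rw [if_pos hdoc]
        rw [ih [] (out ++ [doc]) (by simp)]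
        rw [alt_append_blank doc xs h, if_pos hdoc]
        simp
      · rw [if_neg hdoc]
        rw [ih [] out (by simp)]
        rw [alt_append_blank doc xs h, if_neg hdoc]
        simp
    · have hlen : ¬ s.length = 0 := by simpa [List.length_eq_zero_iff] using hs
      simp only [List.foldl_cons, if_neg hlen]
      rw [ih (doc ++ [s]) out (by
        intro t ht
        rcases List.mem_append.mp ht with h1 | h1
        · exact h t h1
        · simp at h1; subst h1; exact hs)]
      simp

-- ===== VERDICT (by name: the statement is the Claim_ definition above) =====
theorem gen_doc_from_lines_spec : Claim_equal_gen_doc_from_lines := by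
  intro seq_iterable _
  unfold Spec_gen_doc_from_lines gen_doc_from_lines
  simpa using main_inv seq_iterable [] [] (by simp)
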